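-- pv_equiv track=rewrite | github.com/collinsakenga/codewars_solutions | 6 kyu/Sort the number sequence.py | sort_sequence
-- ===== SOURCE A (Python) =====
-- def sort_sequence(sequence):
--     res=[]
--     arr=[]
--     for i in sequence:
--         arr.append(i)
--         if i==0:
--             res.append(sorted(arr[:-1])+[0])
--             arr=[]
--     return [j for i in sorted(res, key=lambda list: sum(list)) for j in i]
-- ===== SOURCE B (Python) =====
-- def sort_sequence(sequence):
--     # Repeatedly split at the first zero via index()+slices instead of an
--     # element-by-element accumulator loop.
--     segs = []
--     while 0 in sequence:
--         i = sequence.index(0)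
--         segs.append(sorted(sequence[:i]) + [0])
--         sequence = sequence[i + 1:]
--     segs.sort(key=sum)
--     return [x for s in segs for x in s]
-- ===== Notes on version B (the rewrite author's own statement) =====
-- stated objective: alternative
-- what changed: B replaces A's per-element accumulator loop with repeated find-first-zero (index) plus slicing: each segment is cut out as a slice sequence[:i] and the remainder sequence[i+1:] is processed next, then segments are stably sorted by sum and flattened.
import Mathlib
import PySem

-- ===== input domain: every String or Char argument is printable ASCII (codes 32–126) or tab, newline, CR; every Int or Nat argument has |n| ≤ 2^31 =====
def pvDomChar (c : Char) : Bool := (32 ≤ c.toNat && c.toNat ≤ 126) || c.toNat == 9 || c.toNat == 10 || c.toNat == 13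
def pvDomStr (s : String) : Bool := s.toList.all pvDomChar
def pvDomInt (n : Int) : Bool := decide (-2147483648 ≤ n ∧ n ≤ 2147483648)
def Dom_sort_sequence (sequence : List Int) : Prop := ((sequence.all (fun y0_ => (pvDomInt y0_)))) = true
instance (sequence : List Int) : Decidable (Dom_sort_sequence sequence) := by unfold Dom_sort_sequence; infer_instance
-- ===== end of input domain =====

-- B replaces A's per-element accumulator loop with repeated find-first-zero plus
-- slicing (objective: alternative decomposition, same cost).

-- ===== PORT A =====
-- for-loop with state (res, arr); arr.append(i); on i==0, res.append(sorted(arr[:-1])+[0]);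
-- finally flatten sorted(res, key=sum)
def sort_sequence (sequence : List Int) : List Int :=
  (PySem.List.sorted
    (sequence.foldl
      (fun (st : List (List Int) × List Int) i =>
        let arr := st.2 ++ [i]
        if i == 0 then
          (st.1 ++ [PySem.List.sorted (PySem.List.slice arr none (some (-1))) (fun x => x) false ++ [0]], [])
        else
          (st.1, arr))
      ([], [])).1
    (fun l => l.sum) false).flatMap (fun i => i)

-- ===== PORT B =====
-- while 0 in sequence: i = sequence.index(0); segs.append(sorted(sequence[:i])+[0]); sequence = sequence[i+1:]
-- (matching on index? covers both the membership test and the index() call: none ↔ 0 not in sequence)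
def sortSequenceAltSegs (sequence : List Int) : List (List Int) :=
  match h : PySem.List.index? sequence 0 with
  | none => []
  | some i =>
      (PySem.List.sorted (PySem.List.slice sequence none (some (i : Int))) (fun x => x) false ++ [0])
        :: sortSequenceAltSegs (PySem.List.slice sequence (some ((i : Int) + 1)) none)
termination_by sequence.length
decreasing_by
  rw [PySem.List.index?_eq_some_iff] at h
  obtain ⟨pre, suf, rfl, hlen, -⟩ := h
  rw [show ((i : Int) + 1) = ((i + 1 : Nat) : Int) by push_cast; ring,
    PySem.List.slice_from_natCast]
  simp only [List.length_drop, List.length_append, List.length_cons]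
  omega

def sort_sequence_alt (sequence : List Int) : List Int :=
  (PySem.List.sorted (sortSequenceAltSegs sequence) (fun l => l.sum) false).flatMap (fun s => s)

-- ===== PRECONDITION & SPEC =====
def Spec_sort_sequence (sequence : List Int) (out : List Int) : Prop := out = sort_sequence_alt sequence
instance (sequence : List Int) (out : List Int) : Decidable (Spec_sort_sequence sequence out) := by unfold Spec_sort_sequence; infer_instance

-- ===== CLAIM (what is proved, stated in full; the proofs are below) =====
def Claim_equal_sort_sequence : Prop := ∀ (sequence : List Int), Dom_sort_sequence sequence → Spec_sort_sequence sequence (sort_sequence sequence)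

-- ===== LEMMAS AND PROOFS =====

-- A's loop body, named (definitionally equal to the lambda in the port of A)
def stepA (st : List (List Int) × List Int) (i : Int) : List (List Int) × List Int :=
  let arr := st.2 ++ [i]
  if i == 0 then
    (st.1 ++ [PySem.List.sorted (PySem.List.slice arr none (some (-1))) (fun x => x) false ++ [0]], [])
  else
    (st.1, arr)

-- common recursive specification of the segment list
def segsSpec (arr : List Int) : List Int → List (List Int)
  | [] => []
  | x :: t =>
      if x = 0 then (PySem.List.sorted arr (fun y => y) false ++ [0]) :: segsSpec [] t
      else segsSpec (arr ++ [x]) t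

lemma stepA_zero (res : List (List Int)) (arr : List Int) :
    stepA (res, arr) 0 = (res ++ [PySem.List.sorted arr (fun x => x) false ++ [0]], []) := by
  simp [stepA, PySem.List.slice_to_neg_one]

lemma stepA_ne (res : List (List Int)) (arr : List Int) {x : Int} (hx : x ≠ 0) :
    stepA (res, arr) x = (res, arr ++ [x]) := by
  simp [stepA, hx]

lemma foldA_eq_segsSpec (l : List Int) : ∀ (res : List (List Int)) (arr : List Int),
    (l.foldl stepA (res, arr)).1 = res ++ segsSpec arr l := by
  induction l with
  | nil => intro res arr; simp [segsSpec]
  | cons x t ih =>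
      intro res arr
      rw [List.foldl_cons]
      by_cases hx : x = 0
      · subst hx
        rw [stepA_zero, ih, segsSpec]
        simp
      · rw [stepA_ne res arr hx, ih, segsSpec]
        simp [hx]

lemma index?_append_left_none {arr l : List Int} (harr : (0:Int) ∉ arr) :
    PySem.List.index? (arr ++ l) 0 = (PySem.List.index? l 0).map (· + arr.length) := by
  induction arr with
  | nil => simp
  | cons a arr ih =>
      have ha : a ≠ 0 := by intro h; exact harr (h ▸ List.mem_cons_self)
      have harr' : (0:Int) ∉ arr := fun h => harr (List.mem_cons_of_mem _ h)
      rw [List.cons_append, PySem.List.index?_cons_of_ne _ ha, ih harr']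
      cases PySem.List.index? l 0
      · simp
      · simp; omega

lemma altSegs_eq_segsSpec (l : List Int) : ∀ (arr : List Int), (0:Int) ∉ arr →
    sortSequenceAltSegs (arr ++ l) = segsSpec arr l := by
  induction l with
  | nil =>
      intro arr harr
      have hidx : PySem.List.index? (arr ++ ([] : List Int)) 0 = none := by
        rw [PySem.List.index?_eq_none_iff]; simpa using harr
      rw [sortSequenceAltSegs.eq_def]
      split
      · rfl
      · rename_i i h; rw [hidx] at h; exact absurd h (by simp)
  | cons x t ih =>
      intro arr harr
      by_cases hx : x = 0
      · subst hx
        have hidx : PySem.List.index? (arr ++ 0 :: t) 0 = some arr.length := by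
          rw [index?_append_left_none harr, PySem.List.index?_cons_self]
          simp
        have h1 : PySem.List.slice (arr ++ 0 :: t) none (some ((arr.length : Nat) : Int)) = arr := by
          rw [PySem.List.slice_to_natCast]; simp
        have h2 : PySem.List.slice (arr ++ 0 :: t) (some (((arr.length : Nat) : Int) + 1)) none = t := by
          rw [show (((arr.length : Nat) : Int) + 1) = ((arr.length + 1 : Nat) : Int) by push_cast; ring,
            PySem.List.slice_from_natCast,
            show arr ++ 0 :: t = (arr ++ [0]) ++ t by simp,
            List.drop_append_of_le_length (by simp)]
          simp
        rw [sortSequenceAltSegs.eq_def]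
        split
        · rename_i h; rw [hidx] at h; exact absurd h (by simp)
        · rename_i i h
          rw [hidx] at h
          obtain rfl : arr.length = i := by injection h
          have h3 := ih [] (by simp)
          rw [List.nil_append] at h3
          rw [h1, h2, h3, segsSpec]
          simp
      · rw [show arr ++ x :: t = (arr ++ [x]) ++ t by simp,
          ih (arr ++ [x]) (by
            intro hm
            rcases List.mem_append.mp hm with h | h
            · exact harr h
            · exact hx (List.mem_singleton.mp h).symm),
          segsSpec]
        simp [hx]

-- ===== VERDICT (by name: the statement is the Claim_ definition above) =====
theorem sort_sequence_spec : Claim_equal_sort_sequence := by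
  intro sequence _
  show (PySem.List.sorted (sequence.foldl stepA ([], [])).1 (fun l => l.sum) false).flatMap (fun i => i)
      = sort_sequence_alt sequence
  rw [foldA_eq_segsSpec, ← altSegs_eq_segsSpec sequence [] (by simp)]
  rfl
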